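-- pv_equiv track=rewrite | github.com/dkrajzew/degrotesque | src/marker_html.py | _get_tag_name
-- ===== SOURCE A (Python) =====
-- def _get_tag_name(document : str) -> str:
--     """Returns the name of the tag that starts at the begin of the given string.
--
--     Args:
--         document (str): The HTML-subpart
--
--     Returns:
--         (str): The name of the tag
--     """
--     i = 0
--     while i<len(document) and (ord(document[i])<=32 or document[i]=="/"):
--         i = i + 1
--     ib = i
--     ie = i
--     while ie<len(document) and document[ie] not in " \n\r\t>/":
--         ie += 1
--     return document[ib:ie]
-- ===== SOURCE B (Python) =====
-- import re
--
-- # One anchored regex does everything: the leading class [\x00-\x20/] consumes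
-- # exactly the chars A's first loop skips (ord<=32 or '/'), and the capturing
-- # group [^ \n\r\t>/]* reads the tag name up to A's exact delimiter set.
-- # The pattern always matches (possibly empty), so '' comes back on
-- # empty/all-junk input just like A.
-- _TAG_RE = re.compile(r'[\x00-\x20/]*([^ \n\r\t>/]*)')
--
-- def _get_tag_name(document : str) -> str:
--     return _TAG_RE.match(document).group(1)
-- ===== Notes on version B (the rewrite author's own statement) =====
-- stated objective: idiomatic
-- what changed: Replaces the two hand-written index-tracking while-loops and the slice by a single anchored compiled regex: [\x00-\x20/]* consumes exactly the chars A's first loop skips and the capturing group [^ \n\r\t>/]* is the tag name; scanning is delegated to the C regex engine instead of a per-character Python loop.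
import Mathlib
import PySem

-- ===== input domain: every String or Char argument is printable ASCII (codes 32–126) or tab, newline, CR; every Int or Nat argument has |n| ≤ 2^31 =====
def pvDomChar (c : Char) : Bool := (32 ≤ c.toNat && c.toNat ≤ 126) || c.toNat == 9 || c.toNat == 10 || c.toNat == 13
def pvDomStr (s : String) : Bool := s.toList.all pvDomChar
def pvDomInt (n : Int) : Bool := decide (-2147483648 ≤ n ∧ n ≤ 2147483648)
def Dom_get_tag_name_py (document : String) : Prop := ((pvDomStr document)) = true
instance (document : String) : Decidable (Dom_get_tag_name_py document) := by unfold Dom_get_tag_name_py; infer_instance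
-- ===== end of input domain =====

-- B replaces A's two hand-written index-tracking while-loops and slice by a single
-- anchored compiled regex (idiomatic); return values are proved identical on all inputs.

-- ===== PORT A =====
-- first while-loop: i advances while i < len and (ord(document[i]) <= 32 or document[i] == "/")
def pvSkipA (cs : List Char) (i : Nat) : Nat :=
  if h : i < cs.length then
    if decide (cs[i].toNat ≤ 32) || cs[i] == '/' then pvSkipA cs (i + 1) else i
  else i
termination_by cs.length - i

-- second while-loop: ie advances while ie < len and document[ie] not in " \n\r\t>/"
def pvScanA (cs : List Char) (ie : Nat) : Nat :=
  if h : ie < cs.length then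
    if !(cs[ie] == ' ' || cs[ie] == '\n' || cs[ie] == '\r' || cs[ie] == '\t' || cs[ie] == '>' || cs[ie] == '/') then
      pvScanA cs (ie + 1)
    else ie
  else ie
termination_by cs.length - ie

def get_tag_name_py (document : String) : String :=
  let cs := document.toList
  let ib := pvSkipA cs 0
  let ie := pvScanA cs ib
  -- document[ib:ie]: exact, since here 0 ≤ ib ≤ ie ≤ len(document)
  String.mk ((cs.drop ib).take (ie - ib))

-- ===== PORT B =====
-- B is one call to re.match(r'[\x00-\x20/]*([^ \n\r\t>/]*)', document).group(1).
-- Port of that library call, exact for this pattern: it is anchored at position 0,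
-- always matches, and needs no backtracking (the greedy leading class is maximal and
-- the greedy group then is maximal), so the group is takeWhile(¬delimiter) applied
-- after dropWhile(char class [\x00-\x20/]); on Dom's chars (9,10,13,32..126) the
-- negated class [^ \n\r\t>/] is exactly the Boolean predicate written here.
def get_tag_name_py_alt (document : String) : String :=
  String.mk
    ((document.toList.dropWhile (fun c => decide (c.toNat ≤ 32) || c == '/')).takeWhile
      (fun c => !(c == ' ' || c == '\n' || c == '\r' || c == '\t' || c == '>' || c == '/')))

-- ===== PRECONDITION & SPEC =====
def Spec_get_tag_name_py (document : String) (out : String) : Prop := out = get_tag_name_py_alt document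
instance (document : String) (out : String) : Decidable (Spec_get_tag_name_py document out) := by unfold Spec_get_tag_name_py; infer_instance

-- ===== CLAIM (what is proved, stated in full; the proofs are below) =====
def Claim_equal_get_tag_name_py : Prop := ∀ (document : String), Dom_get_tag_name_py document → Spec_get_tag_name_py document (get_tag_name_py document)

-- ===== LEMMAS AND PROOFS =====

theorem pvSkipA_drop (cs : List Char) (i : Nat) :
    cs.drop (pvSkipA cs i) = (cs.drop i).dropWhile (fun c => decide (c.toNat ≤ 32) || c == '/') := by
  fun_induction pvSkipA cs i with
  | case1 i h hp ih =>
    rw [ih, List.drop_eq_getElem_cons h, List.dropWhile_cons]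
    simp [hp]
  | case2 i h hp =>
    rw [List.drop_eq_getElem_cons h, List.dropWhile_cons]
    simp [hp]
  | case3 i h =>
    rw [List.drop_eq_nil_of_le (by omega), List.dropWhile_nil]

theorem pvScanA_le (cs : List Char) (i : Nat) : i ≤ pvScanA cs i := by
  fun_induction pvScanA cs i with
  | case1 i h hp ih => omega
  | case2 i h hp => omega
  | case3 i h => omega

theorem pvScanA_take (cs : List Char) (i : Nat) :
    (cs.drop i).take (pvScanA cs i - i) =
      (cs.drop i).takeWhile (fun c => !(c == ' ' || c == '\n' || c == '\r' || c == '\t' || c == '>' || c == '/')) := by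
  fun_induction pvScanA cs i with
  | case1 i h hp ih =>
    have hle := pvScanA_le cs (i + 1)
    rw [List.drop_eq_getElem_cons h, List.takeWhile_cons]
    have he : pvScanA cs (i + 1) - i = (pvScanA cs (i + 1) - (i + 1)) + 1 := by omega
    rw [he, List.take_succ_cons, ih]
    simp [hp]
  | case2 i h hp =>
    rw [List.drop_eq_getElem_cons h, List.takeWhile_cons]
    simp only [Nat.sub_self, List.take_zero]
    simp [hp]
  | case3 i h =>
    rw [List.drop_eq_nil_of_le (by omega)]
    simp

-- ===== VERDICT (by name: the statement is the Claim_ definition above) =====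
theorem get_tag_name_py_spec : Claim_equal_get_tag_name_py := by
  intro document _
  unfold Spec_get_tag_name_py get_tag_name_py get_tag_name_py_alt
  have h0 : document.toList.drop (pvSkipA document.toList 0) =
      document.toList.dropWhile (fun c => decide (c.toNat ≤ 32) || c == '/') := by
    simpa using pvSkipA_drop document.toList 0
  rw [← h0]
  exact congrArg String.mk (pvScanA_take document.toList (pvSkipA document.toList 0))
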